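-- pv_equiv track=rewrite | github.com/ashuhg/alx-interview | 0x0A-primegame/0-prime_game.py | isWinner
-- ===== SOURCE A (Python) =====
-- def prime_numbers_between(n):
--     """
--     calculate prime numbers between 1 and n
--
--     Args:
--         n (int): the number to calculate prime numbers up to
--
--     Returns: the number of prime numbers between 1 and n
--     """
--     prime_numbers = 0
--
--     for i in range(2, n + 1):
--         is_prime = all(i % j != 0 for j in range(2, i // 2 + 1))
--         if is_prime:
--             prime_numbers += 1
--     return prime_numbers
--
-- def isWinner(x, nums):
--     """
--     Determines the winner of a game of prime numbers.
--
--     Args: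
--         x (int): the number of rounds to play
--         nums (list): the list of numbers n to play
--
--     Returns: the winner of the game (Ben or Maria)
--     """
--     if not x or not nums:
--         return None
--     ben = 0
--     maria = 0
--     for i in range(x):
--         prime_nums = prime_numbers_between(nums[i])
--         if prime_nums % 2 == 0:
--             ben += 1
--         else:
--             maria += 1
--     if ben == maria:
--         return None
--     return "Ben" if ben > maria else "Mari"
-- ===== SOURCE B (Python) =====
-- def isWinner(x, nums):
--     """Winner of the prime game: one sieve-style prefix table of prime counts
--     built once up to max(nums[:x]), then O(1) parity lookup per round."""
--     if not x or not nums: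
--         return None
--     rounds = nums[:x] if x > 0 else []
--     limit = max(rounds, default=1)
--     counts = [0] * (limit + 1)
--     c = 0
--     for i in range(2, limit + 1):
--         if all(i % j for j in range(2, i // 2 + 1)):
--             c += 1
--         counts[i] = c
--     maria = sum(1 for n in rounds if n >= 2 and counts[n] % 2 == 1)
--     ben = len(rounds) - maria
--     if ben == maria:
--         return None
--     return "Ben" if ben > maria else "Mari"
-- ===== Notes on version B (the rewrite author's own statement) =====
-- stated objective: faster
-- what changed: B builds one prefix table of prime counts up to max(nums[:x]) in a single pass and answers each round by an O(1) table lookup and a parity count, instead of A's per-round recount of all primes below nums[i].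
import Mathlib
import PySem

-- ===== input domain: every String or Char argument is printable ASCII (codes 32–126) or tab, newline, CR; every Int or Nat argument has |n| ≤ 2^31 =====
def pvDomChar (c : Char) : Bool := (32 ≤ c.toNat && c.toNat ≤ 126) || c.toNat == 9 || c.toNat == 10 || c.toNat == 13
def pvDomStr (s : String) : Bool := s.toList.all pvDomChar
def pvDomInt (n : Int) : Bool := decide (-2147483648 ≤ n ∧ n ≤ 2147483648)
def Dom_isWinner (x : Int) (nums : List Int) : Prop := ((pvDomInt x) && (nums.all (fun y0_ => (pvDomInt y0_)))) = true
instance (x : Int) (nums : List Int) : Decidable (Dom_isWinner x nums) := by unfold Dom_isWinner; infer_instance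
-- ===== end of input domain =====

-- B replaces A's per-round recount of all primes (O(x·m²)) by one prefix table of
-- prime counts built once plus an O(1) lookup per round (objective: faster).

-- ===== PORT A =====
-- the trial-division test 'all(i % j for j in range(2, i // 2 + 1))' — literally the
-- same expression in Source A's prime_numbers_between and in Source B's table-building loop
def isPrimeTD (i : Int) : Bool :=
  (PySem.List.pyRange 2 (PySem.Int.floordiv i 2 + 1)).all (fun j => PySem.Int.mod i j != 0)

def prime_numbers_between (n : Int) : Int :=
  (PySem.List.pyRange 2 (n + 1)).foldl (fun acc i => if isPrimeTD i then acc + 1 else acc) 0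

def isWinner (x : Int) (nums : List Int) : Option String :=
  if x = 0 ∨ nums = [] then none
  else
    -- nums[i]: pyGetD is exact here; the IndexError case (x > len nums) is excluded by Pre_
    let bm := (PySem.List.pyRange 0 x).foldl
      (fun (bm : Int × Int) i =>
        if PySem.Int.mod (prime_numbers_between (PySem.List.pyGetD nums i 0)) 2 = 0
        then (bm.1 + 1, bm.2) else (bm.1, bm.2 + 1)) (0, 0)
    if bm.1 = bm.2 then none
    else if bm.1 > bm.2 then some "Ben" else some "Mari"

-- ===== PORT B =====
-- Source B's table loop: counts[i] = number of primes ≤ i, filled by one pass 2..limit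
-- ([0]*(limit+1) is [] for limit+1 < 0, exactly (limit+1).toNat)
def countsTable (limit : Int) : List Int :=
  ((PySem.List.pyRange 2 (limit + 1)).foldl
    (fun (st : List Int × Int) i =>
      let c := if isPrimeTD i then st.2 + 1 else st.2
      (PySem.List.pySetD st.1 i c, c))
    (List.replicate (limit + 1).toNat 0, 0)).1

def isWinner_alt (x : Int) (nums : List Int) : Option String :=
  if x = 0 ∨ nums = [] then none
  else
    let rounds : List Int := if x > 0 then PySem.List.slice nums none (some x) else []
    let limit : Int := PySem.List.maxD rounds (fun v => v) 1
    let counts : List Int := countsTable limit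
    let maria : Int := rounds.foldl
      (fun acc n => if n ≥ 2 ∧ PySem.Int.mod (PySem.List.pyGetD counts n 0) 2 = 1
                    then acc + 1 else acc) 0
    let ben : Int := (rounds.length : Int) - maria
    if ben = maria then none
    else if ben > maria then some "Ben" else some "Mari"

-- ===== PRECONDITION & SPEC =====
-- Pre_ excludes exactly the inputs where A raises IndexError (nums non-empty and x > len(nums))
def Pre_isWinner (x : Int) (nums : List Int) : Prop := nums = [] ∨ x ≤ (nums.length : Int)
instance (x : Int) (nums : List Int) : Decidable (Pre_isWinner x nums) := by
  unfold Pre_isWinner; infer_instance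

def pvWitness_isWinner : Int × List Int := (2, [3, 4])

def Spec_isWinner (x : Int) (nums : List Int) (out : Option String) : Prop := out = isWinner_alt x nums
instance (x : Int) (nums : List Int) (out : Option String) : Decidable (Spec_isWinner x nums out) := by
  unfold Spec_isWinner; infer_instance

-- ===== CLAIM (what is proved, stated in full; the proofs are below) =====
def Claim_equal_isWinner : Prop := ∀ (x : Int) (nums : List Int), Dom_isWinner x nums → Pre_isWinner x nums → Spec_isWinner x nums (isWinner x nums)


-- ===== LEMMAS AND PROOFS =====

lemma pnb_of_lt_two (n : Int) (h : n < 2) : prime_numbers_between n = 0 := by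
  rw [prime_numbers_between, PySem.List.pyRange_one_eq_nil (by omega)]
  rfl

lemma pnb_succ (m : Int) (h : 1 ≤ m) :
    prime_numbers_between (m + 1) =
      if isPrimeTD (m + 1) then prime_numbers_between m + 1 else prime_numbers_between m := by
  rw [prime_numbers_between, PySem.List.pyRange_one_succ_right (by omega : (2:Int) ≤ m + 1),
    List.foldl_append]
  rw [prime_numbers_between]
  simp only [List.foldl_cons, List.foldl_nil]

-- the body of Source B's table loop, named for the invariant proof (defeq to the lambda in countsTable)
def countsStep (st : List Int × Int) (i : Int) : List Int × Int :=
  let c := if isPrimeTD i then st.2 + 1 else st.2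
  (PySem.List.pySetD st.1 i c, c)

-- invariant of the table loop after processing 2..1+k: sizes are kept, the running counter
-- is prime_numbers_between (1+k), and every filled cell n holds prime_numbers_between n
lemma counts_fold_inv (limit : Int) (hl : 1 ≤ limit) (k : Nat) (hk : 1 + (k : Int) ≤ limit) :
    ((PySem.List.pyRange 2 (1 + (k : Int) + 1)).foldl countsStep
        (List.replicate (limit + 1).toNat 0, 0)).1.length = (limit + 1).toNat ∧
    ((PySem.List.pyRange 2 (1 + (k : Int) + 1)).foldl countsStep
        (List.replicate (limit + 1).toNat 0, 0)).2 = prime_numbers_between (1 + (k : Int)) ∧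
    ∀ n : Int, 2 ≤ n → n ≤ 1 + (k : Int) →
      PySem.List.pyGetD ((PySem.List.pyRange 2 (1 + (k : Int) + 1)).foldl countsStep
        (List.replicate (limit + 1).toNat 0, 0)).1 n 0 = prime_numbers_between n := by
  induction k with
  | zero =>
      rw [PySem.List.pyRange_one_eq_nil (by omega)]
      refine ⟨by simp, ?_, ?_⟩
      · simp [pnb_of_lt_two 1 (by omega)]
      · intro n h2 hn; omega
  | succ k ih =>
      have hk' : 1 + (k : Int) ≤ limit := by push_cast at hk ⊢; omega
      obtain ⟨ihlen, ihc, ihget⟩ := ih hk'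
      have hcast : (1 + ((k : Nat) + 1 : Nat) + 1 : Int) = (1 + (k : Int) + 1) + 1 := by
        push_cast; ring
      rw [hcast, PySem.List.pyRange_one_succ_right (by omega), List.foldl_append]
      set stk := (PySem.List.pyRange 2 (1 + (k : Int) + 1)).foldl countsStep
        (List.replicate (limit + 1).toNat 0, 0) with hstk
      have hc' : (countsStep stk (1 + (k : Int) + 1)).2
          = prime_numbers_between (1 + ((k : Nat) + 1 : Nat)) := by
        show (if isPrimeTD (1 + (k : Int) + 1) then stk.2 + 1 else stk.2) = _
        have : (1 + ((k : Nat) + 1 : Nat) : Int) = (1 + (k : Int)) + 1 := by push_cast; ring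
        rw [this, pnb_succ (1 + (k : Int)) (by omega), ihc]
      have hidx : ((k + 2 : Nat) : Int) = 1 + (k : Int) + 1 := by push_cast; ring
      have hlt : (k + 2 : Nat) < (limit + 1).toNat := by omega
      refine ⟨?_, ?_, ?_⟩
      · show (PySem.List.pySetD stk.1 _ _).length = _
        rw [PySem.List.length_pySetD, ihlen]
      · simpa [List.foldl_cons, List.foldl_nil] using hc'
      · intro n h2 hn
        simp only [List.foldl_cons, List.foldl_nil]
        show PySem.List.pyGetD (PySem.List.pySetD stk.1 (1 + (k : Int) + 1)
          (countsStep stk (1 + (k : Int) + 1)).2) n 0 = _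
        have hn0 : n = ((n.toNat : Nat) : Int) := by omega
        rw [hn0, ← hidx,
          PySem.List.pyGetD_pySetD_natCast stk.1 (k + 2) n.toNat _ 0 (by rw [ihlen]; exact hlt)]
        by_cases hcase : n.toNat = k + 2
        · rw [if_pos hcase, hidx, hc']
          congr 1
          omega
        · rw [if_neg hcase, ← hn0]
          exact ihget n h2 (by omega)

lemma countsTable_spec (limit : Int) (hl : 1 ≤ limit) (n : Int) (h2 : 2 ≤ n) (hn : n ≤ limit) :
    PySem.List.pyGetD (countsTable limit) n 0 = prime_numbers_between n := by
  have hk : limit = 1 + ((limit - 1).toNat : Int) := by omega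
  have := (counts_fold_inv limit hl (limit - 1).toNat (by omega)).2.2 n h2 (by omega)
  rw [← hk] at this
  rw [countsTable]
  exact this

lemma countP_not_add (p : Int → Bool) (l : List Int) :
    l.countP p + l.countP (fun a => !p a) = l.length := by
  induction l with
  | nil => simp
  | cons x t ih => by_cases h : p x <;> simp [h] <;> omega

-- A's round loop: each iteration increments exactly one of (ben, maria)
lemma pairfold (P : Int → Prop) [DecidablePred P] (vs : List Int) (b m : Int) :
    vs.foldl (fun bm v => if P v then (bm.1 + 1, bm.2) else (bm.1, bm.2 + 1)) (b, m)
      = (b + (vs.countP (fun v => decide (P v)) : Int),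
         m + (vs.countP (fun v => !decide (P v)) : Int)) := by
  induction vs generalizing b m with
  | nil => simp
  | cons v t ih =>
      simp only [List.foldl_cons]
      by_cases h : P v
      · rw [if_pos h, ih]
        simp [h]
        ring
      · rw [if_neg h, ih]
        simp [h]
        ring

-- ===== VERDICT (by name: the statement is the Claim_ definition above) =====
theorem isWinner_spec : Claim_equal_isWinner := by
  intro x nums _ hpre
  unfold Spec_isWinner isWinner isWinner_alt
  by_cases hg : x = 0 ∨ nums = []
  · rw [if_pos hg, if_pos hg]
  · rw [if_neg hg, if_neg hg]
    rw [not_or] at hg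
    obtain ⟨hx0, hnil⟩ := hg
    by_cases hxpos : x > 0
    case neg =>
      have hx : x < 0 := by omega
      rw [PySem.List.pyRange_one_eq_nil (le_of_lt hx)]
      simp [hxpos]
    case pos =>
      have hxle : x ≤ (nums.length : Int) := hpre.resolve_left hnil
      simp only []
      rw [if_pos hxpos, PySem.List.slice_to nums (le_of_lt hxpos)]
      set rounds := nums.take x.toNat with hrounds
      have hrl : rounds.length = x.toNat := by
        rw [hrounds, List.length_take]; omega
      have hlenr : PySem.List.len rounds = x := by rw [PySem.List.len_eq, hrl]; omega
      set limit := PySem.List.maxD rounds (fun v => v) 1 with hlim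
      have hfold :
          (PySem.List.pyRange 0 x).foldl
            (fun (bm : Int × Int) i =>
              if PySem.Int.mod (prime_numbers_between (PySem.List.pyGetD nums i 0)) 2 = 0
              then (bm.1 + 1, bm.2) else (bm.1, bm.2 + 1)) (0, 0)
          = rounds.foldl
              (fun (bm : Int × Int) v =>
                if PySem.Int.mod (prime_numbers_between v) 2 = 0
                then (bm.1 + 1, bm.2) else (bm.1, bm.2 + 1)) (0, 0) := by
        rw [← hlenr, ← PySem.List.foldl_pyRange_zero_pyGetD rounds 0
            (fun (bm : Int × Int) v =>
              if PySem.Int.mod (prime_numbers_between v) 2 = 0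
              then (bm.1 + 1, bm.2) else (bm.1, bm.2 + 1)) (0, 0)]
        apply PySem.List.foldl_congr_mem
        intro acc i hi
        rw [PySem.List.mem_pyRange_one, hlenr] at hi
        obtain ⟨h0, hix⟩ := hi
        rw [PySem.List.pyGetD_of_nonneg _ _ h0, PySem.List.pyGetD_of_nonneg _ _ h0]
        have hlt : i.toNat < x.toNat := by omega
        simp only [List.getD, hrounds, List.getElem?_take_of_lt hlt]
        rfl
      rw [hfold, pairfold (fun v => PySem.Int.mod (prime_numbers_between v) 2 = 0) rounds 0 0,
        PySem.List.foldl_ite_add_one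
          (fun n => n ≥ 2 ∧ PySem.Int.mod (PySem.List.pyGetD (countsTable limit) n 0) 2 = 1)
          rounds 0]
      have hcnt :
          rounds.countP (fun v => !decide (PySem.Int.mod (prime_numbers_between v) 2 = 0))
            = rounds.countP (fun n => decide (n ≥ 2 ∧
                PySem.Int.mod (PySem.List.pyGetD (countsTable limit) n 0) 2 = 1)) := by
        apply List.countP_congr
        intro v hv
        have hvle : v ≤ limit := PySem.List.le_maxD_id rounds 1 v hv
        by_cases h2 : 2 ≤ v
        · rw [countsTable_spec limit (by omega) v h2 hvle]
          rcases PySem.Int.mod_two_eq (prime_numbers_between v) with h | h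
          · simp only [h]; simp
          · simp only [h]; simp [h2]
        · rw [pnb_of_lt_two v (by omega)]
          simp [h2]
      have htot := countP_not_add
        (fun v => decide (PySem.Int.mod (prime_numbers_between v) 2 = 0)) rounds
      rw [hcnt]
      have e1 : (0:Int) + (rounds.countP
            (fun v => decide (PySem.Int.mod (prime_numbers_between v) 2 = 0)) : Int)
          = (rounds.length : Int) - ((0:Int) + (rounds.countP (fun n => decide (n ≥ 2 ∧
              PySem.Int.mod (PySem.List.pyGetD (countsTable limit) n 0) 2 = 1)) : Int)) := by
        rw [← hcnt]; push_cast at htot ⊢; omega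
      rw [e1]
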